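-- pv_equiv track=rewrite | github.com/GOGOsu/CV_MajorAssignment | main.py | movePoints
-- ===== SOURCE A (Python) =====
-- def dotProduct(a, b):
--     m, n, p = len(a), len(b), len(b[0])
--     res = []
--     for i in range(m):
--         res.append([])
--         for j in range(p):
--             res[i].append(sum([a[i][r] * b[r][j] for r in range(n)]))
--     return res
--
-- def movePoints(points, deltaX, deltaY):
--     origMatrix = [[],
--                   [],
--                   []]
--     for point in points:
--         origMatrix[0].append(point[0])
--         origMatrix[1].append(point[1])
--         origMatrix[2].append(1)
--
--     moveMatrix = [[1, 0, deltaX],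
--                   [0, 1, deltaY],
--                   [0, 0, 1]]
--
--     resMatrix = dotProduct(moveMatrix, origMatrix)
--     resPoints = []
--     for i in range(len(points)):
--         resPoints.append((resMatrix[0][i], resMatrix[1][i]))
--     return resPoints
-- ===== SOURCE B (Python) =====
-- def movePoints(points, deltaX, deltaY):
--     # B: direct translation, one pass, no homogeneous-matrix machinery.
--     return [(p[0] + deltaX, p[1] + deltaY) for p in points]
-- ===== Notes on version B (the rewrite author's own statement) =====
-- stated objective: simpler
-- what changed: Replaced the homogeneous 3x3 translation-matrix construction and generic dotProduct with a single comprehension adding the delta to each coordinate.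
import Mathlib
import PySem

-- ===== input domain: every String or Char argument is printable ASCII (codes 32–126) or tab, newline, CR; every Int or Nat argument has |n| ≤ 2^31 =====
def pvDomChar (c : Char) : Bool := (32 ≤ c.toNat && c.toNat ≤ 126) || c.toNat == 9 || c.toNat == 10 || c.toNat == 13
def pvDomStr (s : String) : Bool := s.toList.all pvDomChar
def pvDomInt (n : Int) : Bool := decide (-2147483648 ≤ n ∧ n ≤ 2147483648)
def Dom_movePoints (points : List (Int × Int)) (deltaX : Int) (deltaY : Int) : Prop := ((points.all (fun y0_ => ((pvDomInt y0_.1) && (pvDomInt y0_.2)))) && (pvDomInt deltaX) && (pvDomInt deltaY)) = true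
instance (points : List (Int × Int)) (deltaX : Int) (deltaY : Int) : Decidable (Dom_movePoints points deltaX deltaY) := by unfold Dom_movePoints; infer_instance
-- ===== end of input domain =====

-- B drops A's homogeneous 3×3 matrix machinery and adds the delta directly in one pass (objective: simpler).

-- ===== PORT A =====
-- dotProduct(a, b) (renamed pyDotProduct: 'dotProduct' clashes with Mathlib): indices i < m, r < n, j < p are always in range in A's use, so getD with
-- default is exact here; sums/loops follow A's range loops step for step.
def pyDotProduct (a b : List (List Int)) : List (List Int) :=
  let m := a.length
  let n := b.length
  let p := (b.getD 0 []).length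
  (List.range m).map (fun i =>
    (List.range p).map (fun j =>
      ((List.range n).map (fun r =>
        ((a.getD i []).getD r 0) * ((b.getD r []).getD j 0))).sum))

def movePoints (points : List (Int × Int)) (deltaX : Int) (deltaY : Int) : List (Int × Int) :=
  -- origMatrix built by appending each point's coordinates column by column
  let origMatrix : List (List Int) :=
    [points.map (fun p => p.1), points.map (fun p => p.2), points.map (fun _ => 1)]
  let moveMatrix : List (List Int) := [[1, 0, deltaX], [0, 1, deltaY], [0, 0, 1]]
  let resMatrix := pyDotProduct moveMatrix origMatrix
  (List.range points.length).map (fun i =>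
    ((resMatrix.getD 0 []).getD i 0, (resMatrix.getD 1 []).getD i 0))

-- ===== PORT B =====
def movePoints_alt (points : List (Int × Int)) (deltaX : Int) (deltaY : Int) : List (Int × Int) :=
  points.map (fun p => (p.1 + deltaX, p.2 + deltaY))

-- ===== PRECONDITION & SPEC =====
def Spec_movePoints (points : List (Int × Int)) (deltaX : Int) (deltaY : Int) (out : List (Int × Int)) : Prop := out = movePoints_alt points deltaX deltaY
instance (points : List (Int × Int)) (deltaX : Int) (deltaY : Int) (out : List (Int × Int)) : Decidable (Spec_movePoints points deltaX deltaY out) := by unfold Spec_movePoints; infer_instance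

-- ===== CLAIM (what is proved, stated in full; the proofs are below) =====
def Claim_equal_movePoints : Prop := ∀ (points : List (Int × Int)) (deltaX : Int) (deltaY : Int), Dom_movePoints points deltaX deltaY → Spec_movePoints points deltaX deltaY (movePoints points deltaX deltaY)

-- ===== LEMMAS AND PROOFS =====

theorem movePoints_eq_alt (points : List (Int × Int)) (deltaX deltaY : Int) :
    movePoints points deltaX deltaY = movePoints_alt points deltaX deltaY := by
  unfold movePoints movePoints_alt pyDotProduct
  simp only [List.length_cons, List.length_nil, List.length_map, List.range_succ,
    List.range_zero, List.nil_append, List.cons_append, List.map_cons, List.map_nil,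
    List.getD_eq_getElem?_getD, List.getElem?_cons_zero, List.getElem?_cons_succ,
    Option.getD_some]
  apply List.ext_getElem
  · simp
  · intro i h1 h2
    have hi : i < points.length := by simpa using h2
    simp [List.getElem?_range, List.getElem?_replicate, List.getElem?_map, List.getElem?_eq_getElem hi, hi]

-- ===== VERDICT (by name: the statement is the Claim_ definition above) =====
theorem movePoints_spec : Claim_equal_movePoints := by
  intro points dx dy _
  unfold Spec_movePoints
  exact movePoints_eq_alt points dx dy
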